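-- pv_equiv track=rewrite | github.com/TomKite57/advent_of_code_2019 | 1602.py | FFT_step
-- ===== SOURCE A (Python) =====
-- def FFT_step(numbers, pattern, offset):
--     output = [0]*len(numbers)
--     output[-1] = numbers[-1]
--     for i in range(len(output)-2, -1, -1):
--         output[i] = output[i+1] + numbers[i]
--     for i in range(len(output)):
--         output[i] = output[i] % 10
--     return output
-- ===== SOURCE B (Python) =====
-- def FFT_step(numbers, pattern, offset):
--     total = sum(numbers)
--     out = []
--     p = 0
--     for x in numbers:
--         out.append((total - p) % 10)
--         p += x
--     return out
-- ===== Notes on version B (the rewrite author's own statement) =====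
-- stated objective: alternative
-- what changed: Replaces A's backward suffix-accumulation into a preallocated mutated list (plus a second in-place mod pass) by a single forward pass that keeps a running prefix sum and emits (total - prefix) % 10 directly.
import Mathlib
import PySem

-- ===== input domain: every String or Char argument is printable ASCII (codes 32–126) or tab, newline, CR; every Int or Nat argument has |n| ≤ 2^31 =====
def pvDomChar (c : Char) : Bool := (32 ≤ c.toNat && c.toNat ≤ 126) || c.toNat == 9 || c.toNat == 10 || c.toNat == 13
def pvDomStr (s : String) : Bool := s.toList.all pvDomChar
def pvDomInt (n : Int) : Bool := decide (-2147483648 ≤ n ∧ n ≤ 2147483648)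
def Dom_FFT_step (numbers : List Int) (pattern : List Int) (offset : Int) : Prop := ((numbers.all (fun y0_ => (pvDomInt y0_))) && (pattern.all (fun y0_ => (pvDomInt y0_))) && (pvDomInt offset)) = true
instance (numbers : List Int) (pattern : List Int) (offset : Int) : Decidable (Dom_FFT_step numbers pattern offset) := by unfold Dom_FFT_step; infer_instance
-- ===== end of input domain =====

-- B replaces A's backward suffix-accumulation (mutating a preallocated list, then a
-- second in-place mod pass) by one forward pass emitting (total - prefix_sum) % 10.
-- `pattern` and `offset` are unused by both, as in the Python.

-- ===== PORT A =====
def FFT_step (numbers : List Int) (pattern : List Int) (offset : Int) : List Int :=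
  let output := List.replicate numbers.length (0 : Int)          -- output = [0]*len(numbers)
  let output := PySem.List.pySetD output (-1) (PySem.List.pyGetD numbers (-1) 0)  -- output[-1] = numbers[-1]
  let output := (PySem.List.pyRange (PySem.List.len output - 2) (-1) (-1)).foldl  -- for i in range(len(output)-2, -1, -1)
      (fun out i => PySem.List.pySetD out i (PySem.List.pyGetD out (i + 1) 0 + PySem.List.pyGetD numbers i 0)) output
  (PySem.List.pyRange 0 (PySem.List.len output) 1).foldl          -- for i in range(len(output)): output[i] %= 10
      (fun out i => PySem.List.pySetD out i (PySem.Int.mod (PySem.List.pyGetD out i 0) 10)) output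

-- ===== PORT B =====
def FFT_step_alt (numbers : List Int) (pattern : List Int) (offset : Int) : List Int :=
  let total := numbers.sum
  (numbers.foldl (fun (st : List Int × Int) x =>
      (st.1 ++ [PySem.Int.mod (total - st.2) 10], st.2 + x)) (([] : List Int), (0 : Int))).1

-- ===== PRECONDITION & SPEC =====
-- Pre_ excludes exactly the empty list, on which A raises IndexError at output[-1].
def Pre_FFT_step (numbers : List Int) (pattern : List Int) (offset : Int) : Prop := numbers ≠ []
instance (numbers : List Int) (pattern : List Int) (offset : Int) : Decidable (Pre_FFT_step numbers pattern offset) := by unfold Pre_FFT_step; infer_instance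
def pvWitness_FFT_step : List Int × List Int × Int := ([1, 2, 3], [0, 1], 0)

def Spec_FFT_step (numbers : List Int) (pattern : List Int) (offset : Int) (out : List Int) : Prop := out = FFT_step_alt numbers pattern offset
instance (numbers : List Int) (pattern : List Int) (offset : Int) (out : List Int) : Decidable (Spec_FFT_step numbers pattern offset out) := by unfold Spec_FFT_step; infer_instance

-- ===== CLAIM (what is proved, stated in full; the proofs are below) =====
def Claim_equal_FFT_step : Prop := ∀ (numbers : List Int) (pattern : List Int) (offset : Int), Dom_FFT_step numbers pattern offset → Pre_FFT_step numbers pattern offset → Spec_FFT_step numbers pattern offset (FFT_step numbers pattern offset)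

-- ===== LEMMAS AND PROOFS =====

-- suffix sums of a list (same length; entry i = sum of the suffix starting at i)
def sfx : List Int → List Int
  | [] => []
  | x :: r => (x + r.sum) :: sfx r

theorem sfx_length (xs : List Int) : (sfx xs).length = xs.length := by
  induction xs with
  | nil => rfl
  | cons x r ih => simp [sfx, ih]

-- B's loop invariant
theorem loopB (total : Int) (suf : List Int) : ∀ (acc : List Int) (p : Int), total - p = suf.sum →
    (suf.foldl (fun (st : List Int × Int) x =>
      (st.1 ++ [PySem.Int.mod (total - st.2) 10], st.2 + x)) (acc, p)).1
    = acc ++ (sfx suf).map (fun s => PySem.Int.mod s 10) := by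
  induction suf with
  | nil => intro acc p _; simp [sfx]
  | cons x r ih =>
      intro acc p hp
      simp only [List.foldl_cons]
      rw [ih (acc ++ [PySem.Int.mod (total - p) 10]) (p + x) (by simp at hp ⊢; omega)]
      have hx : total - p = x + r.sum := by simpa using hp
      simp [sfx, ← hx]

theorem B_eq_sfx (numbers pattern : List Int) (offset : Int) :
    FFT_step_alt numbers pattern offset = (sfx numbers).map (fun s => PySem.Int.mod s 10) := by
  unfold FFT_step_alt
  simpa using loopB numbers.sum numbers [] 0 (by simp)

-- A's first loop: invariant = low j cells still 0, cells from j on hold suffix sums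
theorem loopA (numbers : List Int) (j : Nat) (hne : numbers ≠ []) (hj : j ≤ numbers.length - 1) :
    (PySem.List.pyRange ((j : Int) - 1) (-1) (-1)).foldl
      (fun out i => PySem.List.pySetD out i (PySem.List.pyGetD out (i + 1) 0 + PySem.List.pyGetD numbers i 0))
      (List.replicate j 0 ++ sfx (numbers.drop j))
    = sfx numbers := by
  induction j with
  | zero =>
      rw [PySem.List.pyRange_neg_one_eq_nil (by omega)]
      simp
  | succ j ih =>
      have hn : numbers.length ≥ 1 := by
        cases numbers with | nil => exact absurd rfl hne | cons a l => simp
      have hjlt : j + 1 ≤ numbers.length - 1 := hj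
      have hcons : PySem.List.pyRange (((j + 1 : Nat) : Int) - 1) (-1) (-1)
          = (j : Int) :: PySem.List.pyRange ((j : Int) - 1) (-1) (-1) := by
        have := PySem.List.pyRange_neg_one_cons (a := ((j + 1 : Nat) : Int) - 1) (b := (-1)) (by push_cast; omega)
        simpa [sub_sub] using this
      rw [hcons]
      simp only [List.foldl_cons]
      -- the state before processing index j
      have hdrop : numbers.drop j = numbers[j] :: numbers.drop (j + 1) := by
        rw [List.drop_eq_getElem_cons (by omega)]
      -- compute the step
      have hget1 : PySem.List.pyGetD (List.replicate (j+1) (0:Int) ++ sfx (numbers.drop (j+1))) ((j:Int) + 1) 0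
          = (numbers.drop (j+1)).sum := by
        have : ((j : Int) + 1) = (((j + 1 : Nat)) : Int) := by push_cast; ring
        rw [this, PySem.List.pyGetD_natCast]
        have hd : numbers.drop (j+1) = numbers[j+1] :: numbers.drop (j+2) := by
          rw [List.drop_eq_getElem_cons (by omega)]
        rw [hd]
        simp only [sfx, List.sum_cons]
        rw [List.getD_append_right _ _ _ _ (by simp)]
        simp
      have hget2 : PySem.List.pyGetD numbers (j : Int) 0 = numbers[j] := by
        rw [PySem.List.pyGetD_natCast]
        exact List.getD_eq_getElem numbers 0 (by omega)
      have hset : PySem.List.pySetD (List.replicate (j+1) (0:Int) ++ sfx (numbers.drop (j+1))) (j : Int)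
            ((numbers.drop (j+1)).sum + numbers[j])
          = List.replicate j 0 ++ sfx (numbers.drop j) := by
        rw [PySem.List.pySetD_natCast]
        rw [List.set_append_left _ _ (by simp)]
        have : (List.replicate (j+1) (0:Int)).set j ((numbers.drop (j+1)).sum + numbers[j])
            = List.replicate j 0 ++ [(numbers.drop (j+1)).sum + numbers[j]] := by
          have h1 : List.replicate (j+1) (0:Int) = List.replicate j 0 ++ [0] := by
            simp [List.replicate_succ']
          rw [h1, List.set_append_right _ _ (by simp)]
          simp
        rw [this, List.append_assoc]
        congr 1
        rw [hdrop]
        simp [sfx, add_comm]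
      rw [hget1, hget2, hset]
      exact ih (by omega)

theorem pySetD_neg_one (xs : List Int) (v : Int) (h : xs ≠ []) :
    PySem.List.pySetD xs (-1) v = xs.set (xs.length - 1) v := by
  have h1 : 1 ≤ xs.length := by cases xs with | nil => exact absurd rfl h | cons a l => simp
  simp [PySem.List.pySetD, PySem.List.pySet?, PySem.List.pyIdx?, h1]

theorem A_eq_sfx (numbers pattern : List Int) (offset : Int) (hne : numbers ≠ []) :
    FFT_step numbers pattern offset
    = (PySem.List.pyRange 0 (PySem.List.len (sfx numbers)) 1).foldl
        (fun out i => PySem.List.pySetD out i (PySem.Int.mod (PySem.List.pyGetD out i 0) 10)) (sfx numbers) := by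
  unfold FFT_step
  dsimp only
  have hn : numbers.length ≥ 1 := by
    cases numbers with | nil => exact absurd rfl hne | cons a l => simp
  -- initialization: output[-1] = numbers[-1]
  have hinit : PySem.List.pySetD (List.replicate numbers.length (0:Int)) (-1) (PySem.List.pyGetD numbers (-1) 0)
      = List.replicate (numbers.length - 1) 0 ++ sfx (numbers.drop (numbers.length - 1)) := by
    have h1 : List.replicate numbers.length (0:Int) = List.replicate (numbers.length - 1) 0 ++ [0] := by
      rw [← List.replicate_succ']
      congr 1
      omega
    have hd : numbers.drop (numbers.length - 1) = [numbers[numbers.length - 1]] := by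
      rw [List.drop_eq_getElem_cons (by omega)]
      rw [List.drop_eq_nil_of_le (by omega)]
    rw [PySem.List.pyGetD_neg_one numbers 0 hne]
    rw [pySetD_neg_one _ _ (by intro hc; rw [List.replicate_eq_nil_iff] at hc; omega)]
    simp only [List.length_replicate]
    rw [h1, List.set_append_right _ _ (by simp)]
    rw [hd]
    simp [sfx, List.getLast_eq_getElem]
  rw [hinit]
  have hlen : PySem.List.len (List.replicate (numbers.length - 1) (0:Int) ++ sfx (numbers.drop (numbers.length - 1)))
      = (numbers.length : Int) := by
    have hd : (numbers.drop (numbers.length - 1)).length = 1 := by simp; omega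
    simp [PySem.List.len_eq, sfx_length, hd]
    omega
  rw [hlen]
  have hrange : (numbers.length : Int) - 2 = ((numbers.length - 1 : Nat) : Int) - 1 := by omega
  rw [hrange, loopA numbers (numbers.length - 1) hne (by omega)]

-- second pass: the in-place mod loop is a map
theorem loopMod (f : Int → Int) (suf : List Int) : ∀ (pre : List Int),
    (PySem.List.pyRange (pre.length) ((pre.length : Int) + suf.length) 1).foldl
      (fun out i => PySem.List.pySetD out i (f (PySem.List.pyGetD out i 0)))
      (pre.map f ++ suf)
    = (pre ++ suf).map f := by
  induction suf with
  | nil =>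
      intro pre
      rw [PySem.List.pyRange_one_eq_nil (by simp)]
      simp
  | cons x r ih =>
      intro pre
      rw [PySem.List.pyRange_one_cons (by simp)]
      simp only [List.foldl_cons]
      have hget : PySem.List.pyGetD (pre.map f ++ x :: r) ((pre.length : Nat) : Int) 0 = x := by
        rw [PySem.List.pyGetD_natCast]
        rw [List.getD_eq_getElem _ 0 (by simp)]
        simp [List.getElem_append_right (by simp : (pre.map f).length ≤ pre.length), List.length_map]
      have hset : PySem.List.pySetD (pre.map f ++ x :: r) ((pre.length : Nat) : Int) (f x)
          = (pre ++ [x]).map f ++ r := by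
        rw [PySem.List.pySetD_natCast]
        rw [List.set_append_right _ _ (by simp)]
        simp
      rw [hget, hset]
      have harith2 : ((pre.length : Int) + (x :: r).length) = ((pre ++ [x]).length : Int) + r.length := by
        simp
        ring
      rw [harith2]
      have harith : ((pre.length : Int) + 1) = (((pre ++ [x]).length : Nat) : Int) := by simp
      rw [harith]
      simpa using ih (pre ++ [x])

-- ===== VERDICT (by name: the statement is the Claim_ definition above) =====
theorem FFT_step_spec : Claim_equal_FFT_step := by
  intro numbers pattern offset _ hpre
  unfold Spec_FFT_step
  rw [A_eq_sfx numbers pattern offset hpre, B_eq_sfx numbers pattern offset]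
  have := loopMod (fun s => PySem.Int.mod s 10) (sfx numbers) []
  simpa [PySem.List.len_eq] using this
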